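-- pv_equiv track=rewrite | github.com/vladislavkleiman/DI_Bootcamp | week_19/day_2/daily_challenge.py | decode_matrix
-- ===== SOURCE A (Python) =====
-- def decode_matrix(m):
--     decoded_message = ''
--     for col in range(len(m[0])):
--         for row in range(len(m)):
--             if m[row][col].isalpha():
--                 decoded_message += m[row][col]
--             elif len(decoded_message) > 0 and decoded_message[-1] != ' ':
--                 decoded_message += ' '
--     return decoded_message
-- ===== SOURCE B (Python) =====
-- def decode_matrix(m):
--     # Pass 1: read column by column, emitting each alpha cell verbatim and a
--     # single space for every non-alpha cell.
--     parts = []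
--     for col in range(len(m[0])):
--         for row in range(len(m)):
--             cell = m[row][col]
--             parts.append(cell if cell.isalpha() else ' ')
--     s = ''.join(parts)
--     # Pass 2: normalise - drop leading spaces and collapse runs of spaces.
--     out = []
--     for ch in s:
--         if ch != ' ' or (out and out[-1] != ' '):
--             out.append(ch)
--     return ''.join(out)
-- ===== Notes on version B (the rewrite author's own statement) =====
-- stated objective: simpler
-- what changed: B replaces A's inline accumulator with stateful space-insertion rules by a two-pass build-then-normalise decomposition: first flatten the column-major traversal into a raw string (alpha cell verbatim, one space per non-alpha cell), then a second pass drops leading spaces and collapses space runs.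
import Mathlib
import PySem

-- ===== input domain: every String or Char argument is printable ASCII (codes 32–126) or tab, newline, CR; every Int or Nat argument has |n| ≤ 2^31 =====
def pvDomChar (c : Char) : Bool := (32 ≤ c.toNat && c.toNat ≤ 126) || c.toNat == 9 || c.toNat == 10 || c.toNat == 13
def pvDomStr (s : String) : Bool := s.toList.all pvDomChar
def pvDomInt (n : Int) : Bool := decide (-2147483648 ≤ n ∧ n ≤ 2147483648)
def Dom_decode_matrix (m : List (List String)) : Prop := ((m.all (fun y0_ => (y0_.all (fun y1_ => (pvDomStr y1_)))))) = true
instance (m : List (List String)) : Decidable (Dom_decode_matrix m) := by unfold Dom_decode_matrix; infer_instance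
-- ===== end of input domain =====

-- B rebuilds the message in two passes (flatten column-major into a raw string, then
-- normalise spaces) instead of A's inline accumulator; objective: simpler decomposition.


-- ===== PORT A =====
-- Literal port of A; the message is carried as a List Char (PySem strings are exact
-- on the List Char side) and packed with String.mk at the end.
def decode_matrix (m : List (List String)) : String :=
  String.mk <|
    (List.range (m.getD 0 []).length).foldl (fun dec col =>
      (List.range m.length).foldl (fun dec row =>
        let cell := (m.getD row []).getD col ""   -- in range on Pre_ (Python raises outside)
        if PySem.Str.strIsalpha cell then dec ++ cell.toList
        else if 0 < dec.length ∧ dec.getLast? ≠ some ' ' then dec ++ [' ']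
        else dec) dec) []

-- ===== PORT B =====
-- Pass 1 of Source B: flatten the column-major traversal into a raw char list
-- (alpha cell verbatim, a single space for every non-alpha cell).
def decode_matrix_raw (m : List (List String)) : List Char :=
  (List.range (m.getD 0 []).length).foldl (fun s col =>
    (List.range m.length).foldl (fun s row =>
      let cell := (m.getD row []).getD col ""   -- in range on Pre_ (Python raises outside)
      s ++ (if PySem.Str.strIsalpha cell then cell.toList else [' '])) s) []

-- Pass 2 of Source B: drop leading spaces, collapse runs of spaces.
def decode_matrix_norm (out : List Char) (ch : Char) : List Char :=
  if ch ≠ ' ' ∨ (out ≠ [] ∧ out.getLast? ≠ some ' ') then out ++ [ch] else out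

def decode_matrix_alt (m : List (List String)) : String :=
  String.mk ((decode_matrix_raw m).foldl decode_matrix_norm [])

-- ===== PRECONDITION & SPEC =====
-- Pre_ excludes exactly the inputs where Python A raises IndexError: the empty matrix
-- (m[0]) and ragged matrices with a row shorter than the first row.
def Pre_decode_matrix (m : List (List String)) : Prop :=
  m ≠ [] ∧ ∀ row ∈ m, (m.getD 0 []).length ≤ row.length
instance (m : List (List String)) : Decidable (Pre_decode_matrix m) := by
  unfold Pre_decode_matrix; infer_instance
def pvWitness_decode_matrix : List (List String) :=
  [["H", "l", "o"], ["e", "l", "#"]]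

def Spec_decode_matrix (m : List (List String)) (out : String) : Prop := out = decode_matrix_alt m
instance (m : List (List String)) (out : String) : Decidable (Spec_decode_matrix m out) := by unfold Spec_decode_matrix; infer_instance

-- ===== CLAIM (what is proved, stated in full; the proofs are below) =====
def Claim_equal_decode_matrix : Prop := ∀ (m : List (List String)), Dom_decode_matrix m → Pre_decode_matrix m → Spec_decode_matrix m (decode_matrix m)

-- ===== LEMMAS AND PROOFS =====

-- The chunk Source B's pass 1 emits for cell (row, col).
def dmPiece (m : List (List String)) (col row : Nat) : List Char :=
  let cell := (m.getD row []).getD col ""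
  if PySem.Str.strIsalpha cell then cell.toList else [' ']

-- Normalising a chunk of non-space characters just appends it.
lemma norm_no_space (l d : List Char) (h : ∀ c ∈ l, c ≠ ' ') :
    l.foldl decode_matrix_norm d = d ++ l := by
  induction l generalizing d with
  | nil => simp
  | cons c t ih =>
    have hc : c ≠ ' ' := h c (by simp)
    simp only [List.foldl_cons, decode_matrix_norm, if_pos (Or.inl hc)]
    rw [ih _ (fun x hx => h x (by simp [hx]))]
    simp

-- An alpha string contains no space.
lemma alpha_no_space (s : List Char) (h : PySem.Chars.strIsalpha s = true) :
    ∀ c ∈ s, c ≠ ' ' := by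
  unfold PySem.Chars.strIsalpha at h
  simp only [Bool.and_eq_true, List.all_eq_true] at h
  intro c hc hsp
  have := h.2 c hc
  rw [hsp] at this
  exact absurd this (by decide)

-- A's step on one cell equals normalising the piece Source B emits for that cell.
lemma step_cell (m : List (List String)) (col row : Nat) (d : List Char) :
    (let cell := (m.getD row []).getD col ""
     if PySem.Str.strIsalpha cell then d ++ cell.toList
     else if 0 < d.length ∧ d.getLast? ≠ some ' ' then d ++ [' ']
     else d)
    = (dmPiece m col row).foldl decode_matrix_norm d := by
  unfold dmPiece
  set cell := (m.getD row []).getD col "" with hc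
  by_cases ha : PySem.Str.strIsalpha cell
  · rw [if_pos ha, if_pos ha,
      norm_no_space _ _ (alpha_no_space _ (by simpa [PySem.Str.strIsalpha] using ha))]
  · simp only [if_neg ha, List.foldl_cons, List.foldl_nil, decode_matrix_norm]
    have heq : (' ' ≠ ' ' ∨ (d ≠ [] ∧ d.getLast? ≠ some ' ')) ↔
        (0 < d.length ∧ d.getLast? ≠ some ' ') := by
      constructor
      · rintro (h | ⟨h1, h2⟩)
        · exact absurd rfl h
        · exact ⟨List.length_pos_iff.mpr h1, h2⟩
      · rintro ⟨h1, h2⟩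
        exact Or.inr ⟨List.length_pos_iff.mp h1, h2⟩
    split_ifs with h1 h2 h2
    · rfl
    · exact absurd (heq.mpr h1) h2
    · exact absurd (heq.mp h2) h1
    · rfl

-- A fold by A's step over any index list is the normalisation of the flattened pieces.
lemma fold_eq_norm_flat (idx : List Nat) (m : List (List String)) (col : Nat) (d : List Char) :
    idx.foldl (fun dec row =>
        let cell := (m.getD row []).getD col ""
        if PySem.Str.strIsalpha cell then dec ++ cell.toList
        else if 0 < dec.length ∧ dec.getLast? ≠ some ' ' then dec ++ [' ']
        else dec) d
    = (idx.flatMap (dmPiece m col)).foldl decode_matrix_norm d := by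
  induction idx generalizing d with
  | nil => simp
  | cons r t ih =>
    simp only [List.foldl_cons, List.flatMap_cons, List.foldl_append]
    rw [← step_cell m col r d, ih]

-- The whole of A is the normalisation of the whole flattened matrix.
lemma outer_eq_norm_flat (cols : List Nat) (m : List (List String)) (d : List Char) :
    cols.foldl (fun dec col =>
        (List.range m.length).foldl (fun dec row =>
          let cell := (m.getD row []).getD col ""
          if PySem.Str.strIsalpha cell then dec ++ cell.toList
          else if 0 < dec.length ∧ dec.getLast? ≠ some ' ' then dec ++ [' ']
          else dec) dec) d
    = (cols.flatMap (fun col => (List.range m.length).flatMap (dmPiece m col))).foldl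
        decode_matrix_norm d := by
  induction cols generalizing d with
  | nil => simp
  | cons c t ih =>
    simp only [List.foldl_cons, List.flatMap_cons, List.foldl_append]
    rw [fold_eq_norm_flat, ih]

-- B's pass 1 computes exactly that flattened matrix.
lemma raw_eq_flat (m : List (List String)) :
    decode_matrix_raw m
    = (List.range (m.getD 0 []).length).flatMap
        (fun col => (List.range m.length).flatMap (dmPiece m col)) := by
  unfold decode_matrix_raw
  have h1 : ∀ (col : Nat) (s : List Char),
      (List.range m.length).foldl (fun s row =>
        let cell := (m.getD row []).getD col ""
        s ++ (if PySem.Str.strIsalpha cell then cell.toList else [' '])) s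
      = s ++ (List.range m.length).flatMap (dmPiece m col) := by
    intro col s
    exact PySem.List.foldl_append_eq_flatMap (dmPiece m col) _ s
  rw [PySem.List.foldl_congr_mem _ _
      (fun s col => s ++ (List.range m.length).flatMap (dmPiece m col)) _
      (fun acc col _ => h1 col acc),
    PySem.List.foldl_append_eq_flatMap]
  simp

-- ===== VERDICT (by name: the statement is the Claim_ definition above) =====
theorem decode_matrix_spec : Claim_equal_decode_matrix := by
  intro m _ _
  unfold Spec_decode_matrix decode_matrix decode_matrix_alt
  rw [raw_eq_flat, outer_eq_norm_flat]
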